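-- pv_equiv track=rewrite | github.com/etienneCharignon/adventOfCode | 2021/j15_chiton.py | find_first_streat_path
-- ===== SOURCE A (Python) =====
-- def find_first_streat_path(input):
--     x, y = 0, 0
--     risk = input[y][x]
--     while x < len(input[0])-1 and y < len(input)-1:
--         y += 1
--         risk += input[y][x]
--         x += 1
--         risk += input[y][x]
--     return risk
-- ===== SOURCE B (Python) =====
-- def find_first_streat_path(input):
--     width = len(input[0])
--
--     def go(rows, width):
--         if width <= 1 or len(rows) <= 1:
--             return rows[0][0]
--         return rows[0][0] + rows[1][0] + go([r[1:] for r in rows[1:]], width - 1)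
--
--     return go(input, width)
-- ===== Notes on version B (the rewrite author's own statement) =====
-- stated objective: alternative
-- what changed: B recurses on the grid structure itself: each step peels off the first row and the first column of every remaining row and recurses on the shrinking sub-grid, replacing A's two mutated index pointers and in-place accumulator with structural recursion on sliced sub-grids.
import Mathlib
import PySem

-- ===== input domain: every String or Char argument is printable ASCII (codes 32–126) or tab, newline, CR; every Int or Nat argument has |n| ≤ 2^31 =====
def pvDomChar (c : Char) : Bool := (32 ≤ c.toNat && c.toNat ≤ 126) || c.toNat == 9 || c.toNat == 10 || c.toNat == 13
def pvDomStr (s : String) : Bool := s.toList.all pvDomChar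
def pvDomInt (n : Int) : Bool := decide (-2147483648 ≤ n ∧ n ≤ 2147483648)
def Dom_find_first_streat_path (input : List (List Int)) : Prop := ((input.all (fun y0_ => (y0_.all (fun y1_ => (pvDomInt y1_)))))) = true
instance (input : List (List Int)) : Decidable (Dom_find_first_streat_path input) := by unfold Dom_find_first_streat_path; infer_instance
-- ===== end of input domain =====

-- B replaces A's two-pointer walk with structural recursion that peels the first row and first column off the grid each step (alternative decomposition, same values).


-- ===== PORT A =====
-- A's while loop: x,y both start at 0 and advance together; each iteration adds
-- input[y+1][x] then input[y+1][x+1].  The loop is transliterated with a fuel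
-- counter (starting at input.length, an upper bound on the iteration count, so
-- fuel never runs out while the loop condition holds) purely as a totality
-- guard.  Indexing uses getD 0: Pre_ guarantees all accesses are in range, so
-- the default is never read on admitted inputs.
def find_first_streat_path_go (input : List (List Int)) : Nat → Nat → Nat → Int → Int
  | 0, _, _, risk => risk
  | fuel + 1, x, y, risk =>
    if x < (input.headD []).length - 1 ∧ y < input.length - 1 then
      find_first_streat_path_go input fuel (x + 1) (y + 1)
        ((risk + ((input.getD (y + 1) []).getD x 0)) + ((input.getD (y + 1) []).getD (x + 1) 0))
    else risk

def find_first_streat_path (input : List (List Int)) : Int :=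
  find_first_streat_path_go input input.length 0 0 ((input.getD 0 []).getD 0 0)

-- ===== PORT B =====
-- B's helper go(rows, width): base case returns rows[0][0]; otherwise add
-- rows[0][0] + rows[1][0] and recurse on [r[1:] for r in rows[1:]] (row slices
-- ported as List.drop 1, exact for Python's r[1:]).  The recursion is made
-- structural with a fuel counter (starting at the initial width, an upper bound
-- on the recursion depth, so fuel never runs out before the base case) purely
-- as a totality guard.  Indexing uses getD 0 as in the port of A.
def find_first_streat_path_alt_go : Nat → List (List Int) → Int → Int
  | 0, rows, _ => (rows.headD []).getD 0 0
  | fuel + 1, rows, width =>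
    if width ≤ 1 ∨ rows.length ≤ 1 then (rows.headD []).getD 0 0
    else (rows.headD []).getD 0 0 + (rows.getD 1 []).getD 0 0 +
         find_first_streat_path_alt_go fuel ((rows.drop 1).map (fun r => r.drop 1)) (width - 1)

def find_first_streat_path_alt (input : List (List Int)) : Int :=
  find_first_streat_path_alt_go (input.headD []).length input (((input.headD []).length : Int))

-- ===== PRECONDITION & SPEC =====
-- Pre_ holds exactly when Python A returns: a nonempty grid with nonempty first
-- row, and every row k along the walked diagonal long enough for input[k][k]
-- (both programs raise IndexError on exactly the excluded inputs).
def Pre_find_first_streat_path (input : List (List Int)) : Prop :=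
  input ≠ [] ∧ input.headD [] ≠ [] ∧
  ∀ k ∈ List.range' 1 (min ((input.headD []).length - 1) (input.length - 1)),
    k < (input.getD k []).length
instance (input : List (List Int)) : Decidable (Pre_find_first_streat_path input) := by
  unfold Pre_find_first_streat_path; infer_instance
def pvWitness_find_first_streat_path : List (List Int) := [[1, 2], [3, 4]]
def Spec_find_first_streat_path (input : List (List Int)) (out : Int) : Prop := out = find_first_streat_path_alt input
instance (input : List (List Int)) (out : Int) : Decidable (Spec_find_first_streat_path input out) := by unfold Spec_find_first_streat_path; infer_instance

-- ===== CLAIM (what is proved, stated in full; the proofs are below) =====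
def Claim_equal_find_first_streat_path : Prop := ∀ (input : List (List Int)), Dom_find_first_streat_path input → Pre_find_first_streat_path input → Spec_find_first_streat_path input (find_first_streat_path input)

-- ===== LEMMAS AND PROOFS =====

-- Both ports are characterised by the same closed-form diagonal sum; each lemma
-- is a straight induction on the fuel counter, generalizing the position k.
theorem find_first_streat_path_go_eq (input : List (List Int)) :
    ∀ (fuel k : Nat) (r : Int),
      min ((input.headD []).length - 1) (input.length - 1) - k ≤ fuel →
      find_first_streat_path_go input fuel k k r =
        r + ((List.range' (k + 1) (min ((input.headD []).length - 1) (input.length - 1) - k)).map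
          (fun j => (input.getD j []).getD (j - 1) 0 + (input.getD j []).getD j 0)).sum := by
  intro fuel
  set n : Nat := min ((input.headD []).length - 1) (input.length - 1) with hn
  induction fuel with
  | zero =>
      intro k r hf
      have h0 : n - k = 0 := by omega
      simp [find_first_streat_path_go, h0]
  | succ fuel ih =>
      intro k r hf
      rw [find_first_streat_path_go]
      by_cases hc : k < (input.headD []).length - 1 ∧ k < input.length - 1
      · rw [if_pos hc]
        have hlt : k < n := by omega
        obtain ⟨m, hm⟩ : ∃ m, n - k = m + 1 := ⟨n - k - 1, by omega⟩
        rw [ih (k + 1) _ (by omega)]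
        have hm' : n - (k + 1) = m := by omega
        rw [hm, hm', List.range'_succ]
        simp
        ring
      · rw [if_neg hc]
        have h0 : n - k = 0 := by omega
        simp [h0]

theorem getD_drop_eq (l : List Int) (k i : Nat) :
    ((l.drop k).getD i 0) = l.getD (k + i) 0 := by
  simp [List.getD, List.getElem?_drop]

theorem shift_headD (input : List (List Int)) (k : Nat) :
    (((input.drop k).map (fun r => r.drop k)).headD []) = (input.getD k []).drop k := by
  have hk : input[k]? = (input.drop k)[0]? := by
    simpa using (List.getElem?_drop input k 0).symm
  cases h : input.drop k with
  | nil =>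
      have ha : input[k]? = none := by rw [hk, h]; rfl
      simp [h, List.getD, ha]
  | cons a t =>
      have ha : input[k]? = some a := by rw [hk, h]; rfl
      simp [h, List.getD, ha]

theorem shift_getD1 (input : List (List Int)) (k : Nat) :
    (((input.drop k).map (fun r => r.drop k)).getD 1 []) = (input.getD (k + 1) []).drop k := by
  simp [List.getD, List.getElem?_map, List.getElem?_drop]
  cases h : input[k + 1]? with
  | none => simp
  | some a => simp

theorem find_first_streat_path_alt_go_eq (input : List (List Int)) :
    ∀ (fuel k : Nat),
      min ((input.headD []).length - 1) (input.length - 1) - k ≤ fuel →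
      find_first_streat_path_alt_go fuel ((input.drop k).map (fun r => r.drop k))
          (((input.headD []).length : Int) - k) =
        (input.getD k []).getD k 0 +
        ((List.range' (k + 1) (min ((input.headD []).length - 1) (input.length - 1) - k)).map
          (fun j => (input.getD j []).getD (j - 1) 0 + (input.getD j []).getD j 0)).sum := by
  intro fuel
  set n : Nat := min ((input.headD []).length - 1) (input.length - 1) with hn
  induction fuel with
  | zero =>
      intro k hf
      have h0 : n - k = 0 := by omega
      rw [find_first_streat_path_alt_go, shift_headD, getD_drop_eq]
      simp [h0]
  | succ fuel ih =>
      intro k hf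
      rw [find_first_streat_path_alt_go]
      have hlen : ((input.drop k).map (fun r => r.drop k)).length = input.length - k := by simp
      by_cases hc : (((input.headD []).length : Int) - k ≤ 1 ∨
          ((input.drop k).map (fun r => r.drop k)).length ≤ 1)
      · rw [if_pos hc]
        rw [hlen] at hc
        have h0 : n - k = 0 := by omega
        rw [shift_headD, getD_drop_eq]
        simp [h0]
      · rw [if_neg hc]
        rw [hlen] at hc
        have hlt : k < n := by omega
        obtain ⟨m, hm⟩ : ∃ m, n - k = m + 1 := ⟨n - k - 1, by omega⟩
        have hshift : (((input.drop k).map (fun r => r.drop k)).drop 1).map (fun r => r.drop 1)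
            = (input.drop (k + 1)).map (fun r => r.drop (k + 1)) := by
          rw [← List.map_drop, List.drop_drop, List.map_map]
          congr 1
          funext r
          simp [List.drop_drop]
        have hw : (((input.headD []).length : Int) - k) - 1 = ((input.headD []).length : Int) - ((k + 1 : Nat) : Int) := by
          push_cast; ring
        rw [hshift, hw, ih (k + 1) (by omega)]
        rw [shift_headD, shift_getD1, getD_drop_eq, getD_drop_eq]
        have hm' : n - (k + 1) = m := by omega
        rw [hm, hm', List.range'_succ]
        simp
        ring

-- ===== VERDICT (by name: the statement is the Claim_ definition above) =====
theorem find_first_streat_path_spec : Claim_equal_find_first_streat_path := by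
  intro input _ _
  unfold Spec_find_first_streat_path find_first_streat_path find_first_streat_path_alt
  rw [find_first_streat_path_go_eq input input.length 0 _ (by omega)]
  have h0 := find_first_streat_path_alt_go_eq input (input.headD []).length 0 (by omega)
  simp only [List.drop_zero, Nat.cast_zero, sub_zero, Nat.sub_zero, List.map_id'] at h0
  rw [h0]
  simp [List.getD]
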